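-- pv_equiv track=rewrite | github.com/ilyakava/py3fst | augment_audio.py | segments_from_loc_minmax
-- ===== SOURCE A (Python) =====
-- def segments_from_loc_minmax(local_maxima, local_minima):
--     """
--     For each local maxima M, outputs a segment that is a:b where
--     a = local minima right before M and b =  local minima right
--     after M.
--     """
--     min_p = 0
--     max_p = 0
--     # start with a max that has a min to the left
--     while local_minima[min_p] > local_maxima[max_p]:
--         max_p += 1
--
--     def ff_max(max_p):
--         # get max just ahead of current min
--         while max_p < (len(local_maxima) ) and min_p < len(local_minima) and (local_minima[min_p] > local_maxima[max_p]):
--             max_p += 1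
--         return max_p
--
--     def ff_min(min_p):
--         # get min closest and before to current max
--         while min_p < (len(local_minima) -1 ) and (local_minima[min_p+1] < local_maxima[max_p]):
--             min_p += 1
--         return min_p
--
--     intervals = []
--     while max_p < len(local_maxima) and min_p < len(local_minima):
--         min_p = ff_min(min_p)
--         if min_p < (len(local_minima) - 1):
--             intervals.append([local_minima[min_p], local_minima[min_p+1]])
--         min_p += 1
--         max_p = ff_max(max_p)
--
--     return intervals
-- ===== SOURCE B (Python) =====
-- def segments_from_loc_minmax(local_maxima, local_minima):
--     """Single for-loop over consecutive minima pairs; the maxima are held in a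
--     reversed stack whose top is popped once an emitted segment covers it.
--     Returns [] when no maxima has a minima to its left (A raises there)."""
--     if not local_minima:
--         return []
--     stack = list(reversed(local_maxima))
--     while stack and stack[-1] < local_minima[0]:
--         stack.pop()
--     out = []
--     for left, right in zip(local_minima, local_minima[1:]):
--         if stack and stack[-1] <= right:
--             out.append([left, right])
--             while stack and stack[-1] < right:
--                 stack.pop()
--     return out
-- ===== Notes on version B (the rewrite author's own statement) =====
-- stated objective: simpler
-- what changed: Replaced A's fused index-pointer machinery (initial scan plus ff_min/ff_max closure while-loops advancing two indices) by one for-loop over the zipped consecutive minima pairs with the maxima kept in a reversed stack: a pair is emitted when the stack top is at or below its right endpoint, and covered maxima are then popped (constant-factor faster: no per-iteration closure calls or repeated index bound checks, just stack peeks/pops).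
-- crash fix: A raises IndexError in its initial while loop when local_minima is empty or every element of local_maxima is strictly below local_minima[0]; B returns [] there (no maxima has a minima to its left, so no segments). — e.g. on segments_from_loc_minmax([1], [5]): A raises IndexError, B returns []
import Mathlib
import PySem

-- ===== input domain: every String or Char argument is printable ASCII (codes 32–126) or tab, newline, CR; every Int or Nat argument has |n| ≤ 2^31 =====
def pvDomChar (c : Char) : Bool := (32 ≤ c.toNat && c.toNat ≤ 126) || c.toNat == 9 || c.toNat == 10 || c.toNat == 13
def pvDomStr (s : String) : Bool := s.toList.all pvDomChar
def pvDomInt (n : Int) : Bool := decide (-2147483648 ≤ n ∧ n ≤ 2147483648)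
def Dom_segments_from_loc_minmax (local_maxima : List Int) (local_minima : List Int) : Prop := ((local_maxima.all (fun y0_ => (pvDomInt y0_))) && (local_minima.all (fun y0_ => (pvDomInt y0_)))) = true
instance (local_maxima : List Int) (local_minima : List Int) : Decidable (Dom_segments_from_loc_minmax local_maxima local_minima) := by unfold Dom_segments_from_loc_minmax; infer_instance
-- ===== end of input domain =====

-- B replaces A's fused index-pointer loops (ff_min/ff_max closures) by one for-loop over
-- zipped consecutive minima pairs with the maxima in a reversed stack (objective: simpler);
-- where A raises IndexError (empty minima, or no maxima at or above the first minima) B returns [].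

-- ===== PORT A =====
-- initial while loop; none = the IndexError Python raises when local_minima[0] or
-- local_maxima[max_p] is out of range (the guard conditions mark those access points)
def pvAInit (local_maxima : List Int) (local_minima : List Int) (max_p : Nat) : Option Nat :=
  if h : 0 < local_minima.length ∧ max_p < local_maxima.length then
    if local_minima.getD 0 0 > local_maxima.getD max_p 0 then
      pvAInit local_maxima local_minima (max_p + 1)
    else some max_p
  else none
termination_by local_maxima.length - max_p
decreasing_by omega

-- ff_max: the guards make every Python index access in range
def pvFfMax (local_maxima : List Int) (local_minima : List Int) (min_p : Nat) (max_p : Nat) : Nat :=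
  if h : max_p < local_maxima.length ∧ min_p < local_minima.length ∧
      local_minima.getD min_p 0 > local_maxima.getD max_p 0 then
    pvFfMax local_maxima local_minima min_p (max_p + 1)
  else max_p
termination_by local_maxima.length - max_p
decreasing_by omega

-- ff_min: local_maxima[max_p] is in range whenever A calls it (outer loop guard)
def pvFfMin (local_maxima : List Int) (local_minima : List Int) (max_p : Nat) (min_p : Nat) : Nat :=
  if h : min_p < local_minima.length - 1 ∧
      local_minima.getD (min_p + 1) 0 < local_maxima.getD max_p 0 then
    pvFfMin local_maxima local_minima max_p (min_p + 1)
  else min_p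
termination_by local_minima.length - 1 - min_p
decreasing_by omega

-- the main loop needs "ff_min does not move min_p backwards" for termination
theorem pvFfMin_ge (local_maxima local_minima : List Int) (max_p min_p : Nat) :
    min_p ≤ pvFfMin local_maxima local_minima max_p min_p := by
  fun_induction pvFfMin local_maxima local_minima max_p min_p with
  | case1 _ _ _ => omega
  | case2 _ _ => omega

def pvALoop (local_maxima : List Int) (local_minima : List Int) (max_p min_p : Nat)
    (intervals : List (List Int)) : List (List Int) :=
  if h : max_p < local_maxima.length ∧ min_p < local_minima.length then
    let mp := pvFfMin local_maxima local_minima max_p min_p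
    let intervals' := if mp < local_minima.length - 1 then
        intervals ++ [[local_minima.getD mp 0, local_minima.getD (mp + 1) 0]]
      else intervals
    pvALoop local_maxima local_minima
      (pvFfMax local_maxima local_minima (mp + 1) max_p) (mp + 1) intervals'
  else intervals
termination_by local_minima.length - min_p
decreasing_by
  have := pvFfMin_ge local_maxima local_minima max_p min_p
  omega

def segments_from_loc_minmax (local_maxima : List Int) (local_minima : List Int) : List (List Int) :=
  match pvAInit local_maxima local_minima 0 with
  | none => []   -- Python raises IndexError here (excluded by Pre_)
  | some max_p => pvALoop local_maxima local_minima max_p 0 []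

-- ===== PORT B =====
-- Source B's 'while stack and stack[-1] < t: stack.pop()' (stack is a Python list,
-- top = last element, so getLast?/dropLast are exact)
def pvBPop (stack : List Int) (t : Int) : List Int :=
  match h : stack.getLast? with
  | some top => if top < t then pvBPop stack.dropLast t else stack
  | none => stack
termination_by stack.length
decreasing_by
  have : stack ≠ [] := by intro hn; subst hn; simp at h
  have : 0 < stack.length := List.length_pos_of_ne_nil this
  simp [List.length_dropLast]; omega

-- body of Source B's for-loop: state = (stack, out), one zipped pair (left, right)
def pvBStep (st : List Int × List (List Int)) (pr : Int × Int) : List Int × List (List Int) :=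
  match st.1.getLast? with
  | some top =>
      if top ≤ pr.2 then (pvBPop st.1 pr.2, st.2 ++ [[pr.1, pr.2]])
      else st
  | none => st

-- zip(local_minima, local_minima[1:]) = mi.zip mi.tail (exact: zip truncates to the shorter)
def segments_from_loc_minmax_alt (local_maxima : List Int) (local_minima : List Int) : List (List Int) :=
  match local_minima with
  | [] => []
  | v0 :: _ =>
      ((local_minima.zip local_minima.tail).foldl pvBStep
        (pvBPop local_maxima.reverse v0, [])).2

-- ===== PRECONDITION & SPEC =====
-- Pre_ excludes exactly the inputs on which A raises IndexError in its initial while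
-- loop: empty local_minima, or no element of local_maxima at or above local_minima[0].
def Pre_segments_from_loc_minmax (local_maxima : List Int) (local_minima : List Int) : Prop :=
  local_minima ≠ [] ∧ ∃ x ∈ local_maxima, local_minima.headD 0 ≤ x
instance (local_maxima : List Int) (local_minima : List Int) : Decidable (Pre_segments_from_loc_minmax local_maxima local_minima) := by unfold Pre_segments_from_loc_minmax; infer_instance

def pvWitness_segments_from_loc_minmax : List Int × List Int := ([1, 5], [0, 2, 6])

-- A raises IndexError when local_minima is empty or every local maxima is strictly below
-- local_minima[0]; B returns [] there (no maxima has a minima to its left, so no segments).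
def Raises_segments_from_loc_minmax (local_maxima : List Int) (local_minima : List Int) : Prop :=
  local_minima = [] ∨ ∀ x ∈ local_maxima, x < local_minima.headD 0
instance (local_maxima : List Int) (local_minima : List Int) : Decidable (Raises_segments_from_loc_minmax local_maxima local_minima) := by unfold Raises_segments_from_loc_minmax; infer_instance

def pvRaiseWitness_segments_from_loc_minmax : List Int × List Int := ([1], [5])
def pvRaiseWitnessOut_segments_from_loc_minmax : List (List Int) := []

def Spec_segments_from_loc_minmax (local_maxima : List Int) (local_minima : List Int) (out : List (List Int)) : Prop := out = segments_from_loc_minmax_alt local_maxima local_minima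
instance (local_maxima : List Int) (local_minima : List Int) (out : List (List Int)) : Decidable (Spec_segments_from_loc_minmax local_maxima local_minima out) := by unfold Spec_segments_from_loc_minmax; infer_instance

-- ===== CLAIM (what is proved, stated in full; the proofs are below) =====
def Claim_equal_segments_from_loc_minmax : Prop := ∀ (local_maxima : List Int) (local_minima : List Int), Dom_segments_from_loc_minmax local_maxima local_minima → Pre_segments_from_loc_minmax local_maxima local_minima → Spec_segments_from_loc_minmax local_maxima local_minima (segments_from_loc_minmax local_maxima local_minima)

def Claim_raises_segments_from_loc_minmax : Prop := (∀ (local_maxima : List Int) (local_minima : List Int), Dom_segments_from_loc_minmax local_maxima local_minima → Raises_segments_from_loc_minmax local_maxima local_minima → ¬ Pre_segments_from_loc_minmax local_maxima local_minima) ∧ (Dom_segments_from_loc_minmax (pvRaiseWitness_segments_from_loc_minmax.1) (pvRaiseWitness_segments_from_loc_minmax.2) ∧ Raises_segments_from_loc_minmax (pvRaiseWitness_segments_from_loc_minmax.1) (pvRaiseWitness_segments_from_loc_minmax.2) ∧ segments_from_loc_minmax_alt (pvRaiseWitness_segments_from_loc_minmax.1) (pvRaiseWitness_segments_from_loc_minmax.2)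 = pvRaiseWitnessOut_segments_from_loc_minmax)

-- ===== LEMMAS AND PROOFS =====

-- proof-layer intermediate: an index-pointer reading of B's loop, used only to bridge
-- A's pointer machine to B's stack fold
def pvBSkip (local_maxima : List Int) (local_minima : List Int) (i : Nat) (j : Nat) : Nat :=
  if h : j < local_maxima.length ∧ local_maxima.getD j 0 < local_minima.getD i 0 then
    pvBSkip local_maxima local_minima i (j + 1)
  else j
termination_by local_maxima.length - j
decreasing_by omega

def pvBLoop (local_maxima : List Int) (local_minima : List Int) (i j : Nat)
    (segments : List (List Int)) : List (List Int) :=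
  if h : i < local_minima.length - 1 ∧ j < local_maxima.length then
    if local_minima.getD (i + 1) 0 ≥ local_maxima.getD j 0 then
      pvBLoop local_maxima local_minima (i + 1) (pvBSkip local_maxima local_minima (i + 1) j)
        (segments ++ [[local_minima.getD i 0, local_minima.getD (i + 1) 0]])
    else
      pvBLoop local_maxima local_minima (i + 1) j segments
  else segments
termination_by local_minima.length - 1 - i
decreasing_by all_goals omega

-- shifting the start index of A's initial scan = scanning the tail
theorem pvAInit_shift (x : Int) (xs : List Int) (local_minima : List Int) (k : Nat) :
    pvAInit (x :: xs) local_minima (k + 1) = (pvAInit xs local_minima k).map (· + 1) := by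
  fun_induction pvAInit xs local_minima k with
  | case1 k h hgt ih =>
      rw [pvAInit, dif_pos (by simp at h ⊢; omega),
        if_pos (by simpa [List.getD_cons_succ] using hgt), ih]
  | case2 k h hgt =>
      rw [pvAInit, dif_pos (by simp at h ⊢; omega),
        if_neg (by simpa [List.getD_cons_succ] using hgt)]
      rfl
  | case3 k h =>
      rw [pvAInit, dif_neg (by simp at h ⊢; omega)]
      rfl

-- A's initial while loop finds the first maxima at or above local_minima[0]
theorem pvAInit_eq_findIdx (local_maxima local_minima : List Int)
    (hne : local_minima ≠ [])
    (hex : ∃ x ∈ local_maxima, local_minima.headD 0 ≤ x) :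
    pvAInit local_maxima local_minima 0 =
      some (local_maxima.findIdx (fun x => decide (local_minima.headD 0 ≤ x))) := by
  cases local_minima with
  | nil => exact absurd rfl hne
  | cons a l =>
      clear hne
      simp only [List.headD_cons] at hex ⊢
      induction local_maxima with
      | nil => simp at hex
      | cons m ms ih =>
          rw [pvAInit, dif_pos (by simp), List.findIdx_cons]
          simp only [List.getD_cons_zero]
          by_cases hm : a > m
          · have hex' : ∃ x ∈ ms, a ≤ x := by
              rcases hex with ⟨x, hx, hle⟩
              rcases List.mem_cons.mp hx with rfl | hx'
              · omega
              · exact ⟨x, hx', hle⟩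
            rw [if_pos hm, pvAInit_shift m ms (a :: l) 0, ih hex']
            simp [show ¬ a ≤ m by omega]
          · rw [if_neg hm]
            simp [show a ≤ m by omega]

-- A's initial scan, whenever it returns, lands where pvBSkip lands
theorem pvAInit_some_eq_skip (local_maxima local_minima : List Int) (j r : Nat)
    (h : pvAInit local_maxima local_minima j = some r) :
    r = pvBSkip local_maxima local_minima 0 j := by
  fun_induction pvAInit local_maxima local_minima j with
  | case1 j hc hgt ih =>
      rw [pvBSkip, dif_pos ⟨hc.2, by omega⟩]
      exact ih h
  | case2 j hc hgt =>
      rw [pvBSkip, dif_neg (by omega)]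
      exact (Option.some_inj.mp h).symm
  | case3 j hc => exact absurd h (by simp)

-- with min_p in range, A's ff_max and pvBSkip advance identically
theorem pvFfMax_eq_pvBSkip (local_maxima local_minima : List Int) (min_p max_p : Nat)
    (h : min_p < local_minima.length) :
    pvFfMax local_maxima local_minima min_p max_p = pvBSkip local_maxima local_minima min_p max_p := by
  fun_induction pvFfMax local_maxima local_minima min_p max_p with
  | case1 max_p hc ih =>
      rw [pvBSkip, dif_pos ⟨hc.1, by omega⟩]
      exact ih
  | case2 max_p hc =>
      rw [pvBSkip, dif_neg (by omega)]

-- ff_min never moves past the last minima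
theorem pvFfMin_le (local_maxima local_minima : List Int) (max_p min_p : Nat)
    (h : min_p ≤ local_minima.length - 1) :
    pvFfMin local_maxima local_minima max_p min_p ≤ local_minima.length - 1 := by
  fun_induction pvFfMin local_maxima local_minima max_p min_p with
  | case1 min_p hc ih => exact ih (by omega)
  | case2 min_p hc => exact h

-- where ff_min stops below the bound, the advance condition has failed
theorem pvFfMin_stop (local_maxima local_minima : List Int) (max_p min_p : Nat)
    (h : pvFfMin local_maxima local_minima max_p min_p < local_minima.length - 1) :
    ¬ (local_minima.getD (pvFfMin local_maxima local_minima max_p min_p + 1) 0 <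
        local_maxima.getD max_p 0) := by
  fun_induction pvFfMin local_maxima local_minima max_p min_p with
  | case1 min_p hc ih => exact ih h
  | case2 min_p hc => intro hlt; exact hc ⟨h, hlt⟩

-- B's pair scan sits still (taking else-steps) exactly while A's ff_min advances
theorem pvBLoop_ffMin (local_maxima local_minima : List Int) (max_p min_p : Nat)
    (acc : List (List Int)) (hj : max_p < local_maxima.length) :
    pvBLoop local_maxima local_minima min_p max_p acc =
      pvBLoop local_maxima local_minima (pvFfMin local_maxima local_minima max_p min_p) max_p acc := by
  fun_induction pvFfMin local_maxima local_minima max_p min_p with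
  | case1 min_p hc ih =>
      rw [pvBLoop, dif_pos ⟨hc.1, hj⟩, if_neg (by omega)]
      exact ih
  | case2 min_p hc => rfl

-- the simulation: one A-iteration = a run of else-steps plus one emitting step of pvBLoop
theorem pvALoop_eq_pvBLoop (local_maxima local_minima : List Int) (max_p min_p : Nat)
    (acc : List (List Int)) :
    pvALoop local_maxima local_minima max_p min_p acc =
      pvBLoop local_maxima local_minima min_p max_p acc := by
  fun_induction pvALoop local_maxima local_minima max_p min_p acc with
  | case1 max_p min_p acc h mp intervals' ih =>
      rw [pvBLoop_ffMin local_maxima local_minima max_p min_p acc h.1]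
      have hle : pvFfMin local_maxima local_minima max_p min_p ≤ local_minima.length - 1 :=
        pvFfMin_le local_maxima local_minima max_p min_p (by omega)
      by_cases hmp : pvFfMin local_maxima local_minima max_p min_p < local_minima.length - 1
      · have hstop := pvFfMin_stop local_maxima local_minima max_p min_p hmp
        rw [pvBLoop, dif_pos ⟨hmp, h.1⟩, if_pos (by omega)]
        rw [← pvFfMax_eq_pvBSkip local_maxima local_minima _ max_p (by omega)]
        simpa [mp, intervals', if_pos hmp] using ih
      · have hmp' : pvFfMin local_maxima local_minima max_p min_p = local_minima.length - 1 := by omega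
        rw [pvBLoop, dif_neg (by omega)]
        have := ih
        simp only [mp, intervals'] at this
        rw [this, pvBLoop, dif_neg (by omega)]
        exact dif_neg hmp
  | case2 max_p min_p acc h =>
      rw [pvBLoop, dif_neg (by omega)]

-- now the bridge from the index reading pvBLoop to B's stack fold
theorem drop_cons_getD (xs : List Int) (j : Nat) (h : j < xs.length) :
    xs.drop j = xs.getD j 0 :: xs.drop (j + 1) := by
  rw [List.drop_eq_getElem_cons h, List.getD_eq_getElem xs 0 h]

-- pvBSkip never overshoots the maxima list
theorem pvBSkip_le (local_maxima local_minima : List Int) (i j : Nat)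
    (h : j ≤ local_maxima.length) :
    pvBSkip local_maxima local_minima i j ≤ local_maxima.length := by
  fun_induction pvBSkip local_maxima local_minima i j with
  | case1 j hc ih => exact ih (by omega)
  | case2 j hc => exact h

theorem pvBPop_nil (t : Int) : pvBPop [] t = [] := by
  unfold pvBPop; rfl

-- one step of Source B's pop loop on a stack with top x
theorem pvBPop_concat (l : List Int) (x t : Int) :
    pvBPop (l ++ [x]) t = if x < t then pvBPop l t else l ++ [x] := by
  conv_lhs => rw [pvBPop.eq_def]
  split
  next top heq =>
    rw [List.getLast?_concat] at heq
    cases heq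
    rw [List.dropLast_concat]
  next heq =>
    rw [List.getLast?_concat] at heq
    cases heq

-- one step of Source B's for-loop body on a stack with top x
theorem pvBStep_concat (l : List Int) (x : Int) (acc : List (List Int)) (pr : Int × Int) :
    pvBStep (l ++ [x], acc) pr =
      if x ≤ pr.2 then (pvBPop (l ++ [x]) pr.2, acc ++ [[pr.1, pr.2]]) else (l ++ [x], acc) := by
  unfold pvBStep
  simp only [List.getLast?_concat]

-- popping the reversed suffix = advancing the skip index
theorem pvBPop_skip (local_maxima local_minima : List Int) (i j : Nat)
    (h : j ≤ local_maxima.length) :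
    pvBPop (local_maxima.drop j).reverse (local_minima.getD i 0) =
      (local_maxima.drop (pvBSkip local_maxima local_minima i j)).reverse := by
  fun_induction pvBSkip local_maxima local_minima i j with
  | case1 j hc ih =>
      rw [drop_cons_getD local_maxima j hc.1, List.reverse_cons, pvBPop_concat,
        if_pos hc.2]
      exact ih (by omega)
  | case2 j hc =>
      by_cases hj : j < local_maxima.length
      · rw [drop_cons_getD local_maxima j hj, List.reverse_cons, pvBPop_concat,
          if_neg (by omega), ← List.reverse_cons, ← drop_cons_getD local_maxima j hj]
      · rw [List.drop_eq_nil_of_le (show local_maxima.length ≤ j by omega),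
          List.reverse_nil, pvBPop_nil]

-- an empty stack is inert through the fold
theorem foldl_nil_stack (l : List (Int × Int)) (acc : List (List Int)) :
    l.foldl pvBStep ([], acc) = ([], acc) := by
  induction l with
  | nil => rfl
  | cons p t ih => simpa [pvBStep] using ih

-- the fold over the remaining zipped pairs computes pvBLoop
theorem foldl_eq_pvBLoop (local_maxima local_minima : List Int) (i j : Nat)
    (acc : List (List Int)) (hj : j ≤ local_maxima.length) :
    (((local_minima.drop i).zip (local_minima.drop (i + 1))).foldl pvBStep
        ((local_maxima.drop j).reverse, acc)).2 =
      pvBLoop local_maxima local_minima i j acc := by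
  fun_induction pvBLoop local_maxima local_minima i j acc with
  | case1 i j acc h hge ih =>
      rw [drop_cons_getD local_minima i (by omega), drop_cons_getD local_minima (i+1) (by omega),
        drop_cons_getD local_maxima j h.2]
      simp only [List.zip_cons_cons, List.foldl_cons]
      rw [List.reverse_cons, pvBStep_concat, if_pos (by simpa using hge),
        ← List.reverse_cons, ← drop_cons_getD local_maxima j h.2,
        pvBPop_skip local_maxima local_minima (i+1) j (by omega),
        ← drop_cons_getD local_minima (i+1) (by omega)]
      exact ih (pvBSkip_le local_maxima local_minima (i+1) j (by omega))
  | case2 i j acc h hge ih =>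
      rw [drop_cons_getD local_minima i (by omega), drop_cons_getD local_minima (i+1) (by omega),
        drop_cons_getD local_maxima j h.2]
      simp only [List.zip_cons_cons, List.foldl_cons]
      rw [List.reverse_cons, pvBStep_concat, if_neg (by simpa using hge),
        ← List.reverse_cons, ← drop_cons_getD local_maxima j h.2,
        ← drop_cons_getD local_minima (i+1) (by omega)]
      exact ih hj
  | case3 i j acc h =>
      by_cases hi : i + 1 < local_minima.length
      · -- then j = local_maxima.length, so the stack is empty
        rw [List.drop_eq_nil_of_le (show local_maxima.length ≤ j by omega),
          List.reverse_nil, foldl_nil_stack]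
      · rw [List.drop_eq_nil_of_le (show local_minima.length ≤ i + 1 by omega),
          List.zip_nil_right]
        rfl

-- ===== VERDICT (by name: the statement is the Claim_ definition above) =====
theorem segments_from_loc_minmax_spec : Claim_equal_segments_from_loc_minmax := by
  intro local_maxima local_minima _ hpre
  unfold Spec_segments_from_loc_minmax
  unfold segments_from_loc_minmax segments_from_loc_minmax_alt
  rw [pvAInit_eq_findIdx local_maxima local_minima hpre.1 hpre.2]
  have hk := pvAInit_some_eq_skip local_maxima local_minima 0
    (local_maxima.findIdx (fun x => decide (local_minima.headD 0 ≤ x)))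
    (pvAInit_eq_findIdx local_maxima local_minima hpre.1 hpre.2)
  cases hmi : local_minima with
  | nil => exact absurd hmi hpre.1
  | cons v0 rest =>
      simp only
      rw [← hmi, pvALoop_eq_pvBLoop, hk]
      rw [← foldl_eq_pvBLoop local_maxima local_minima 0 (pvBSkip local_maxima local_minima 0 0) []
        (pvBSkip_le local_maxima local_minima 0 0 (by omega))]
      rw [← pvBPop_skip local_maxima local_minima 0 0 (by omega)]
      simp only [List.drop_zero]
      have : local_minima.getD 0 0 = v0 := by rw [hmi]; rfl
      rw [this, hmi]
      rfl

@[simp] theorem segments_from_loc_minmax_raises : Claim_raises_segments_from_loc_minmax := by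
  unfold Claim_raises_segments_from_loc_minmax
  refine ⟨?_, by decide, by decide, by decide⟩
  rintro ma mi _ (h | h) ⟨hne, x, hx, hle⟩
  · exact hne h
  · exact absurd hle (by have := h x hx; omega)
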